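-- pv_equiv track=rewrite | github.com/mtfehl/finance | quiz_utils.py | undelimit
-- ===== SOURCE A (Python) =====
-- from typing import List
--
-- def undelimit(x: str) -> List[str]:
--     """The given string will be returned as a list of strings separated by commas."""
--     new_list: List[str] = []
--     new_str: str = ""
--     for letters in x:
--         new_str += letters
--         if letters == ",":
--             new_list.append(new_str)
--             new_str = ""
--     return new_list
-- ===== SOURCE B (Python) =====
-- def undelimit(x: str) -> "list[str]":
--     """The given string will be returned as a list of strings separated by commas."""
--     return [p + "," for p in x.split(",")[:-1]]
-- ===== Notes on version B (the rewrite author's own statement) =====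
-- stated objective: idiomatic
-- what changed: Replaces the character-by-character scan with a running string buffer by one whole-string split on the comma delimiter, dropping the final unterminated part and reattaching the delimiter in a comprehension.
import Mathlib
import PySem

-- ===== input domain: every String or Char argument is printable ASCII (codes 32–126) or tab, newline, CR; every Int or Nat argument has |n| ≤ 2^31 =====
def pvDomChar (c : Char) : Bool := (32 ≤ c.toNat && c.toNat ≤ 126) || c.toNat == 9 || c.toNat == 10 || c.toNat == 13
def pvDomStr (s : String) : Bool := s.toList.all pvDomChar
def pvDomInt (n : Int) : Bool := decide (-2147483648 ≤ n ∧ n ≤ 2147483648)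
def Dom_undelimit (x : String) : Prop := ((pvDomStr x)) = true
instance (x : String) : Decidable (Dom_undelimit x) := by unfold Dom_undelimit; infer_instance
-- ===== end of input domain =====

-- B replaces A's character scan with a running buffer by split(",") + reattaching the delimiter (idiomatic).

-- ===== PORT A =====
-- A scans the characters, growing a buffer, flushing it to the output list at each comma.
def undelimit (x : String) : List String :=
  (x.toList.foldl
    (fun (st : List String × List Char) c =>
      let buf := st.2 ++ [c]
      if c = ',' then (st.1 ++ [String.ofList buf], ([] : List Char)) else (st.1, buf))
    (([] : List String), ([] : List Char))).1

-- ===== PORT B =====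
-- x.split(",") (sep ≠ "" form), drop the last piece with the slice [:-1], reattach ",".
def undelimit_alt (x : String) : List String :=
  (PySem.List.slice ((PySem.Chars.splitOn x.toList [',']).map String.ofList) none (some (-1))).map
    (fun p => p ++ ",")

-- ===== PRECONDITION & SPEC =====
def Spec_undelimit (x : String) (out : List String) : Prop := out = undelimit_alt x
instance (x : String) (out : List String) : Decidable (Spec_undelimit x out) := by unfold Spec_undelimit; infer_instance

-- ===== CLAIM (what is proved, stated in full; the proofs are below) =====
def Claim_equal_undelimit : Prop := ∀ (x : String), Dom_undelimit x → Spec_undelimit x (undelimit x)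

-- ===== LEMMAS AND PROOFS =====

-- reference comma split: `mySplit pre l` = the pieces of `pre ++ l` split at commas of `l`
def mySplit (pre : List Char) : List Char → List (List Char)
  | [] => [pre]
  | c :: rest => if c = ',' then pre :: mySplit [] rest else mySplit (pre ++ [c]) rest

theorem mySplit_ne_nil (pre : List Char) (l : List Char) : mySplit pre l ≠ [] := by
  induction l generalizing pre with
  | nil => simp [mySplit]
  | cons c rest ih =>
    simp only [mySplit]
    split_ifs
    · simp
    · exact ih _

theorem splitOn_go_eq (fuel : Nat) (l : List Char) (h : l.length < fuel)
    (cur : List Char) (acc : List (List Char)) :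
    PySem.Chars.splitOn.go [','] fuel l cur acc = acc.reverse ++ mySplit cur.reverse l := by
  induction fuel generalizing l cur acc with
  | zero => omega
  | succ n ih =>
    cases l with
    | nil => simp [PySem.Chars.splitOn.go, mySplit]
    | cons c rest =>
      simp only [PySem.Chars.splitOn.go, List.isPrefixOf, List.length_cons] at *
      by_cases hc : c = ','
      · subst hc
        simp only [beq_self_eq_true, Bool.true_and, if_pos, List.length_nil, Nat.zero_add,
          List.drop_succ_cons, List.drop_zero]
        rw [ih rest (by omega) [] (cur.reverse :: acc)]
        simp [mySplit]
      · have hcc : (',' == c) = false := beq_eq_false_iff_ne.mpr fun h' => hc h'.symm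
        simp only [hcc, Bool.false_and, Bool.false_eq_true, if_false]
        rw [ih rest (by omega) (c :: cur) acc]
        simp only [mySplit, if_neg hc, List.reverse_cons]

theorem splitOn_eq_mySplit (l : List Char) :
    PySem.Chars.splitOn l [','] = mySplit [] l := by
  unfold PySem.Chars.splitOn
  simpa using splitOn_go_eq (l.length + 1) l (by omega) [] []

theorem foldA_eq (l : List Char) (out : List String) (buf : List Char) :
    (l.foldl
      (fun (st : List String × List Char) c =>
        let b := st.2 ++ [c]
        if c = ',' then (st.1 ++ [String.ofList b], ([] : List Char)) else (st.1, b))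
      (out, buf)).1
    = out ++ (mySplit buf l).dropLast.map (fun p => String.ofList (p ++ [','])) := by
  induction l generalizing out buf with
  | nil => simp [mySplit]
  | cons c rest ih =>
    by_cases hc : c = ','
    · subst hc
      simp only [List.foldl_cons, mySplit]
      rw [ih]
      rcases hm : mySplit [] rest with _ | ⟨p, ps⟩
      · exact (mySplit_ne_nil _ _ hm).elim
      · simp [← hm, List.dropLast_cons_of_ne_nil (mySplit_ne_nil [] rest)]
    · simp only [List.foldl_cons, if_neg hc, mySplit]
      rw [ih]

-- ===== VERDICT (by name: the statement is the Claim_ definition above) =====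
theorem undelimit_spec : Claim_equal_undelimit := by
  intro x _
  unfold Spec_undelimit undelimit undelimit_alt
  rw [splitOn_eq_mySplit, foldA_eq, PySem.List.slice_to_neg_one]
  rw [← List.map_dropLast, List.map_map, List.nil_append]
  congr 1
  funext p
  show String.ofList (p ++ [',']) = String.ofList p ++ ","
  simp [String.ofList_append]
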